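-- pv_equiv track=rewrite | github.com/prashantkumaris23-create/bio_lab | src/alignment.py | _merge_alignment
-- ===== SOURCE A (Python) =====
-- from typing import List, Tuple
--
-- def _merge_alignment(
--     current_center: str,
--     existing_alignment: dict[str, str],
--     pair_center: str,
--     pair_other: str,
--     pair_identifier: str,
-- ) -> Tuple[str, dict[str, str]]:
--     # Merge one new pairwise alignment into the current multiple alignment while
--     # preserving gap positions that were already introduced earlier.
--     merged_existing = {key: [] for key in existing_alignment}
--     merged_pair: List[str] = []
--     merged_center: List[str] = []
--
--     i = 0
--     j = 0
--     while i < len(current_center) or j < len(pair_center):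
--         current_char = current_center[i] if i < len(current_center) else None
--         pair_char = pair_center[j] if j < len(pair_center) else None
--
--         if current_char == pair_char and current_char is not None:
--             merged_center.append(current_char)
--             for key, sequence in existing_alignment.items():
--                 merged_existing[key].append(sequence[i])
--             merged_pair.append(pair_other[j])
--             i += 1
--             j += 1
--             continue
--
--         if current_char == "-":
--             merged_center.append(current_char)
--             for key, sequence in existing_alignment.items():
--                 merged_existing[key].append(sequence[i])
--             merged_pair.append("-")
--             i += 1
--             continue
--
--         if pair_char == "-":
--             merged_center.append(pair_char)
--             for key in merged_existing:
--                 merged_existing[key].append("-")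
--             merged_pair.append(pair_other[j])
--             j += 1
--             continue
--
--         if current_char is None and pair_char is not None:
--             merged_center.append(pair_char)
--             for key in merged_existing:
--                 merged_existing[key].append("-")
--             merged_pair.append(pair_other[j])
--             j += 1
--             continue
--
--         if pair_char is None and current_char is not None:
--             merged_center.append(current_char)
--             for key, sequence in existing_alignment.items():
--                 merged_existing[key].append(sequence[i])
--             merged_pair.append("-")
--             i += 1
--             continue
--
--         raise ValueError("Unable to merge alignments because center sequences diverged unexpectedly.")
--
--     updated_alignment = {key: "".join(chars) for key, chars in merged_existing.items()}
--     updated_alignment[pair_identifier] = "".join(merged_pair)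
--     return "".join(merged_center), updated_alignment
-- ===== SOURCE B (Python) =====
-- from typing import List, Tuple
--
--
-- def _merge_alignment(
--     current_center: str,
--     existing_alignment: dict[str, str],
--     pair_center: str,
--     pair_other: str,
--     pair_identifier: str,
-- ) -> Tuple[str, dict[str, str]]:
--     # Run-length reformulation: view each center string as segments
--     # (gap_run_length, base_char); aligned gap runs merge to a single run of
--     # length max(a, b) (simultaneous gaps share one column), then the base
--     # characters must agree.  No character-by-character two-pointer walk.
--     def segments(s: str) -> List[Tuple[int, str | None]]:
--         segs: List[Tuple[int, str | None]] = []
--         gap = 0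
--         for ch in s:
--             if ch == "-":
--                 gap += 1
--             else:
--                 segs.append((gap, ch))
--                 gap = 0
--         segs.append((gap, None))
--         return segs
--
--     sa = segments(current_center)
--     sp = segments(pair_center)
--     n = max(len(sa), len(sp))
--     sa = sa + [(0, None)] * (n - len(sa))
--     sp = sp + [(0, None)] * (n - len(sp))
--
--     center_parts: List[str] = []
--     pair_parts: List[str] = []
--     cols: List[int | None] = []  # per column: index into the old block, or None = gap
--     i = 0
--     j = 0
--     for (a, x), (b, y) in zip(sa, sp):
--         g = max(a, b)
--         center_parts.append("-" * g)
--         cols.extend(i + t if t < a else None for t in range(g))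
--         pair_parts.append("".join(pair_other[j + t] if t < b else "-" for t in range(g)))
--         if x is not None and y is not None:
--             if x != y:
--                 raise ValueError("Unable to merge alignments because center sequences diverged unexpectedly.")
--             center_parts.append(x)
--             cols.append(i + a)
--             pair_parts.append(pair_other[j + b])
--         elif y is not None:
--             center_parts.append(y)
--             cols.append(None)
--             pair_parts.append(pair_other[j + b])
--         elif x is not None:
--             center_parts.append(x)
--             cols.append(i + a)
--             pair_parts.append("-")
--         i += a + (x is not None)
--         j += b + (y is not None)
--
--     updated_alignment = {
--         key: "".join(sequence[c] if c is not None else "-" for c in cols)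
--         for key, sequence in existing_alignment.items()
--     }
--     updated_alignment[pair_identifier] = "".join(pair_parts)
--     return "".join(center_parts), updated_alignment
-- ===== Notes on version B (the rewrite author's own statement) =====
-- stated objective: alternative
-- what changed: A walks the two center strings character by character with two pointers, appending to every row inline at each step; B instead tokenises each center into run-length segments (gap-run length, base character), merges corresponding segments in closed form (aligned gap runs collapse to a single run of length max(a,b), then the base characters must agree), and materialises every row from the resulting column descriptors.
-- outside the precondition, e.g. on _merge_alignment('ab', {'k': 'xy'}, 'ba', 'cd', 'q'): A raises ValueError, B raises ValueError; on _merge_alignment('ab', {'k': 'x'}, 'ab', 'cd', 'q'): A raises IndexError, B raises IndexError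
import Mathlib
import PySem

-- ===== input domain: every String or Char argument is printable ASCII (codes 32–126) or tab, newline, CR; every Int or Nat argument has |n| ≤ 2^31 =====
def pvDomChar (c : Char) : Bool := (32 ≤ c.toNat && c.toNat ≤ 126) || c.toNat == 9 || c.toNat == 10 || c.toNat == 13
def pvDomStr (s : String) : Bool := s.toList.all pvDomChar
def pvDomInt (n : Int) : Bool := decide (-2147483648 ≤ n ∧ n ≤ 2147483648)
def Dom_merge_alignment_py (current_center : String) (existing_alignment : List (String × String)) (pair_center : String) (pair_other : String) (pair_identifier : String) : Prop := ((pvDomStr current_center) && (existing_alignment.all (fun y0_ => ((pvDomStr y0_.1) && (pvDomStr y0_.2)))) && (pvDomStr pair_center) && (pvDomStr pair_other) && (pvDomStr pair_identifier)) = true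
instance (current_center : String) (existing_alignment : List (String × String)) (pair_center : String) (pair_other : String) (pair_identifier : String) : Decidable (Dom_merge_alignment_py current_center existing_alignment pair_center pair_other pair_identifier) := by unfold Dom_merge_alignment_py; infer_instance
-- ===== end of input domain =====

-- B replaces A's character-by-character two-pointer walk by a run-length
-- reformulation: each center string is tokenised into (gap-run, base-char)
-- segments and corresponding segments merge in closed form (aligned gap runs
-- collapse to a run of length max(a,b), then the base chars must agree);
-- objective: alternative algorithm, same return value on all non-raising inputs.

-- ===== PORT A =====
-- a row is ((key, source sequence), accumulated output chars);
-- `for key, sequence in …: merged_existing[key].append(sequence[i])`; none = IndexError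
def mergeRowsA (i : Nat) : List ((String × List Char) × List Char) →
    Option (List ((String × List Char) × List Char))
  | [] => some []
  | r :: rs => (r.1.2[i]?).bind (fun ch => (mergeRowsA i rs).map ((r.1, r.2 ++ [ch]) :: ·))

-- `for key in merged_existing: merged_existing[key].append("-")`
def gapRowsA (rows : List ((String × List Char) × List Char)) :
    List ((String × List Char) × List Char) :=
  rows.map (fun r => (r.1, r.2 ++ ['-']))

-- the `while i < len(current_center) or j < len(pair_center)` loop of A; the
-- `x if i < len(…) else None` chars and the branch chain become a decision tree
-- over the two bounds tests, branches in Python's order;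
-- none = some exception (the ValueError, or an IndexError from sequence[i]/pair_other[j])
def loopA (cl pl pol : List Char) (i j : Nat) (ctr : List Char)
    (rows : List ((String × List Char) × List Char)) (pr : List Char) :
    Option (List Char × List ((String × List Char) × List Char) × List Char) :=
  if hi : i < cl.length then
    if hj : j < pl.length then
      if cl[i] = pl[j] then
        (mergeRowsA i rows).bind (fun rows' => (pol[j]?).bind (fun pch =>
          loopA cl pl pol (i+1) (j+1) (ctr ++ [cl[i]]) rows' (pr ++ [pch])))
      else if cl[i] = '-' then
        (mergeRowsA i rows).bind (fun rows' =>
          loopA cl pl pol (i+1) j (ctr ++ [cl[i]]) rows' (pr ++ ['-']))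
      else if pl[j] = '-' then
        (pol[j]?).bind (fun pch =>
          loopA cl pl pol i (j+1) (ctr ++ [pl[j]]) (gapRowsA rows) (pr ++ [pch]))
      else none  -- raise ValueError
    else
      if cl[i] = '-' then
        (mergeRowsA i rows).bind (fun rows' =>
          loopA cl pl pol (i+1) j (ctr ++ [cl[i]]) rows' (pr ++ ['-']))
      else  -- `pair_char is None and current_char is not None`
        (mergeRowsA i rows).bind (fun rows' =>
          loopA cl pl pol (i+1) j (ctr ++ [cl[i]]) rows' (pr ++ ['-']))
  else if hj : j < pl.length then
    if pl[j] = '-' then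
      (pol[j]?).bind (fun pch =>
        loopA cl pl pol i (j+1) (ctr ++ [pl[j]]) (gapRowsA rows) (pr ++ [pch]))
    else  -- `current_char is None and pair_char is not None`
      (pol[j]?).bind (fun pch =>
        loopA cl pl pol i (j+1) (ctr ++ [pl[j]]) (gapRowsA rows) (pr ++ [pch]))
  else
    some (ctr, rows, pr)  -- loop guard false: fall through
termination_by (cl.length - i) + (pl.length - j)
decreasing_by all_goals omega

def merge_alignment_py (current_center : String) (existing_alignment : List (String × String)) (pair_center : String) (pair_other : String) (pair_identifier : String) : String × (List (String × String)) :=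
  match loopA current_center.toList pair_center.toList pair_other.toList 0 0 []
      ((PySem.Dict.ofList existing_alignment).items.map
        (fun kv => ((kv.1, kv.2.toList), ([] : List Char)))) [] with
  | none => ("", [])  -- Python raises here (excluded by Pre_)
  | some (ctr, rowsF, pr) =>
    (String.ofList ctr,
     ((PySem.Dict.mk (rowsF.map (fun r => (r.1.1, String.ofList r.2)))).insert
        pair_identifier (String.ofList pr)).items)

-- ===== PORT B =====
-- the `segments` helper of Source B: run of '-' accumulates in `gap`, each non-gap
-- char closes a (gap, char) token, trailing gaps end in a (gap, None) token
def segLoopB (acc : List (Nat × Option Char)) (gap : Nat) : List Char → List (Nat × Option Char)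
  | [] => acc ++ [(gap, none)]
  | c :: rest => if c = '-' then segLoopB acc (gap+1) rest else segLoopB (acc ++ [(gap, some c)]) 0 rest

def segmentsB (s : List Char) : List (Nat × Option Char) := segLoopB [] 0 s

-- `"".join(pair_other[j + t] if t < b else "-" for t in range(g))`; none = IndexError
def segPairB (pol : List Char) (b j g : Nat) : Option (List Char) :=
  (List.range g).mapM (fun t => if t < b then pol[j+t]? else some '-')

-- `i + t if t < a else None for t in range(g)`
def gapColsB (a i g : Nat) : List (Option Nat) :=
  (List.range g).map (fun t => if t < a then some (i+t) else none)

-- the `for (a, x), (b, y) in zip(sa, sp)` loop of Source B; state = (i, j,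
-- center_parts, cols, pair_parts); none = the ValueError or an IndexError
def bMerge (pol : List Char) : List ((Nat × Option Char) × (Nat × Option Char)) → Nat → Nat →
    List (List Char) → List (Option Nat) → List (List Char) →
    Option (List (List Char) × List (Option Nat) × List (List Char))
  | [], _, _, cp, cs, pp => some (cp, cs, pp)
  | ((a, x), (b, y)) :: rest, i, j, cp, cs, pp =>
    (segPairB pol b j (max a b)).bind (fun gp =>
      match x, y with
      | some cx, some cy =>
        if cx ≠ cy then none  -- raise ValueError
        else (pol[j+b]?).bind (fun pch =>
          bMerge pol rest (i+a+1) (j+b+1)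
            (cp ++ [List.replicate (max a b) '-', [cx]])
            (cs ++ gapColsB a i (max a b) ++ [some (i+a)]) (pp ++ [gp, [pch]]))
      | none, some cy =>
        (pol[j+b]?).bind (fun pch =>
          bMerge pol rest (i+a) (j+b+1)
            (cp ++ [List.replicate (max a b) '-', [cy]])
            (cs ++ gapColsB a i (max a b) ++ [none]) (pp ++ [gp, [pch]]))
      | some cx, none =>
        bMerge pol rest (i+a+1) (j+b)
          (cp ++ [List.replicate (max a b) '-', [cx]])
          (cs ++ gapColsB a i (max a b) ++ [some (i+a)]) (pp ++ [gp, ['-']])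
      | none, none =>
        bMerge pol rest (i+a) (j+b)
          (cp ++ [List.replicate (max a b) '-'])
          (cs ++ gapColsB a i (max a b)) (pp ++ [gp]))

-- `sequence[c] if c is not None else "-"`
def rowChar2 (s : List Char) (c : Option Nat) : Option Char :=
  match c with
  | some i => s[i]?
  | none => some '-'

-- the generator inside `"".join(…)` of the dict comprehension
def rowChars2 (s : List Char) : List (Option Nat) → Option (List Char)
  | [] => some []
  | c :: cs => (rowChar2 s c).bind (fun ch => (rowChars2 s cs).map (ch :: ·))

-- the dict comprehension over existing_alignment.items()
def rowsB2 (cols : List (Option Nat)) : List (String × String) → Option (List (String × String))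
  | [] => some []
  | kv :: rest =>
    ((rowChars2 kv.2.toList cols).map (fun cs => (kv.1, String.ofList cs))).bind
      (fun row => (rowsB2 cols rest).map (row :: ·))

def merge_alignment_py_alt (current_center : String) (existing_alignment : List (String × String)) (pair_center : String) (pair_other : String) (pair_identifier : String) : String × (List (String × String)) :=
  let sa0 := segmentsB current_center.toList
  let sp0 := segmentsB pair_center.toList
  let n := max sa0.length sp0.length
  let sa := sa0 ++ List.replicate (n - sa0.length) ((0 : Nat), (none : Option Char))
  let sp := sp0 ++ List.replicate (n - sp0.length) ((0 : Nat), (none : Option Char))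
  match bMerge pair_other.toList (sa.zip sp) 0 0 [] [] [] with
  | none => ("", [])  -- Python raises here (excluded by Pre_)
  | some (cp, cols, pp) =>
    match rowsB2 cols (PySem.Dict.ofList existing_alignment).items with
    | none => ("", [])  -- IndexError while materialising a row (excluded by Pre_)
    | some rows =>
      (String.ofList cp.flatten,
       ((PySem.Dict.mk rows).insert pair_identifier (String.ofList pp.flatten)).items)

-- ===== PRECONDITION & SPEC =====
-- Pre_ excludes exactly the inputs on which A raises: a ValueError when the two
-- center strings are not gap-compatible (their gap-stripped forms are not one a
-- prefix of the other), and an IndexError when some aligned sequence is shorter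
-- than current_center or pair_other is shorter than pair_center.
def Pre_merge_alignment_py (current_center : String) (existing_alignment : List (String × String)) (pair_center : String) (pair_other : String) (pair_identifier : String) : Prop :=
  (∀ kv ∈ existing_alignment, current_center.toList.length ≤ kv.2.toList.length) ∧
  pair_center.toList.length ≤ pair_other.toList.length ∧
  ((current_center.toList.filter (· ≠ '-')) <+: (pair_center.toList.filter (· ≠ '-')) ∨
   (pair_center.toList.filter (· ≠ '-')) <+: (current_center.toList.filter (· ≠ '-')))
instance (current_center : String) (existing_alignment : List (String × String)) (pair_center : String) (pair_other : String) (pair_identifier : String) : Decidable (Pre_merge_alignment_py current_center existing_alignment pair_center pair_other pair_identifier) := by unfold Pre_merge_alignment_py; infer_instance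

def pvWitness_merge_alignment_py : String × (List (String × String)) × String × String × String :=
  ("AC", [("s1", "AC")], "A-C", "GTC", "p")

def Spec_merge_alignment_py (current_center : String) (existing_alignment : List (String × String)) (pair_center : String) (pair_other : String) (pair_identifier : String) (out : String × (List (String × String))) : Prop := out = merge_alignment_py_alt current_center existing_alignment pair_center pair_other pair_identifier
instance (current_center : String) (existing_alignment : List (String × String)) (pair_center : String) (pair_other : String) (pair_identifier : String) (out : String × (List (String × String))) : Decidable (Spec_merge_alignment_py current_center existing_alignment pair_center pair_other pair_identifier out) := by unfold Spec_merge_alignment_py; infer_instance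

-- ===== CLAIM (what is proved, stated in full; the proofs are below) =====
def Claim_equal_merge_alignment_py : Prop := ∀ (current_center : String) (existing_alignment : List (String × String)) (pair_center : String) (pair_other : String) (pair_identifier : String), Dom_merge_alignment_py current_center existing_alignment pair_center pair_other pair_identifier → Pre_merge_alignment_py current_center existing_alignment pair_center pair_other pair_identifier → Spec_merge_alignment_py current_center existing_alignment pair_center pair_other pair_identifier (merge_alignment_py current_center existing_alignment pair_center pair_other pair_identifier)

-- ===== LEMMAS AND PROOFS =====

-- proof-side intermediate: the list of per-column descriptors
-- (center char, source index into the old block or none, pair-row char)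
-- that A's walk implicitly produces
def opsB (cl pl pol : List Char) (i j : Nat) : Option (List (Char × Option Nat × Char)) :=
  if hi : i < cl.length then
    if hj : j < pl.length then
      if cl[i] = pl[j] then
        (pol[j]?).bind (fun pch => (opsB cl pl pol (i+1) (j+1)).map ((cl[i], some i, pch) :: ·))
      else if cl[i] = '-' then
        (opsB cl pl pol (i+1) j).map ((cl[i], some i, '-') :: ·)
      else if pl[j] = '-' then
        (pol[j]?).bind (fun pch => (opsB cl pl pol i (j+1)).map ((pl[j], none, pch) :: ·))
      else none
    else
      if cl[i] = '-' then (opsB cl pl pol (i+1) j).map ((cl[i], some i, '-') :: ·)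
      else (opsB cl pl pol (i+1) j).map ((cl[i], some i, '-') :: ·)
  else if hj : j < pl.length then
    if pl[j] = '-' then
      (pol[j]?).bind (fun pch => (opsB cl pl pol i (j+1)).map ((pl[j], none, pch) :: ·))
    else
      (pol[j]?).bind (fun pch => (opsB cl pl pol i (j+1)).map ((pl[j], none, pch) :: ·))
  else
    some []
termination_by (cl.length - i) + (pl.length - j)
decreasing_by all_goals omega

def rowChar (s : List Char) (op : Char × Option Nat × Char) : Option Char :=
  match op.2.1 with
  | some i => s[i]?
  | none => some '-'

def rowCharsB (s : List Char) : List (Char × Option Nat × Char) → Option (List Char)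
  | [] => some []
  | op :: ops => (rowChar s op).bind (fun ch => (rowCharsB s ops).map (ch :: ·))

-- replay an op list over A-style rows
def applyRows (ops : List (Char × Option Nat × Char)) :
    List ((String × List Char) × List Char) →
    Option (List ((String × List Char) × List Char))
  | [] => some []
  | r :: rs =>
    ((rowCharsB r.1.2 ops).map (fun cs => (r.1, r.2 ++ cs))).bind
      (fun r' => (applyRows ops rs).map (r' :: ·))

lemma applyRows_nil (rows : List ((String × List Char) × List Char)) :
    applyRows [] rows = some rows := by
  induction rows with
  | nil => rfl
  | cons r rs ih => simp [applyRows, rowCharsB, ih]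

lemma applyRows_idx (rows : List ((String × List Char) × List Char)) (i : Nat)
    (x pch : Char) (ops : List (Char × Option Nat × Char)) :
    applyRows ((x, some i, pch) :: ops) rows
      = (mergeRowsA i rows).bind (fun rows' => applyRows ops rows') := by
  induction rows with
  | nil => rfl
  | cons r rs ih =>
    simp only [applyRows, mergeRowsA, rowCharsB, rowChar, ih]
    rcases hg : r.1.2[i]? with _ | ch
    · rfl
    · rcases hrest : mergeRowsA i rs with _ | rs'
      · rcases hops : rowCharsB r.1.2 ops with _ | cs <;> simp [hops]
      · rcases hops : rowCharsB r.1.2 ops with _ | cs <;> simp [hops, applyRows]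

lemma applyRows_gap (rows : List ((String × List Char) × List Char))
    (y pch : Char) (ops : List (Char × Option Nat × Char)) :
    applyRows ((y, none, pch) :: ops) rows = applyRows ops (gapRowsA rows) := by
  induction rows with
  | nil => rfl
  | cons r rs ih =>
    simp only [applyRows, gapRowsA, List.map_cons, rowCharsB, rowChar, ih]
    rcases hops : rowCharsB r.1.2 ops with _ | cs <;> simp [hops, applyRows, gapRowsA]

lemma loopA_eq (cl pl pol : List Char) (i j : Nat) (ctr : List Char)
    (rows : List ((String × List Char) × List Char)) (pr : List Char) :
    loopA cl pl pol i j ctr rows pr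
      = (opsB cl pl pol i j).bind (fun ops =>
          (applyRows ops rows).map (fun rows' =>
            (ctr ++ ops.map (·.1), rows', pr ++ ops.map (fun op => op.2.2)))) := by
  fun_induction loopA cl pl pol i j ctr rows pr with
  | case1 =>
    rename_i i j ctr rows pr hi hj heq ih
    rw [opsB]; simp only [dif_pos hi, dif_pos hj, if_pos heq]
    rcases hpo : pol[j]? with _ | pch
    · cases hm : mergeRowsA i rows <;> simp [hpo, hm]
    · simp only [hpo, Option.bind_some, ih]
      rcases hrec : opsB cl pl pol (i+1) (j+1) with _ | ops
      · cases hm : mergeRowsA i rows <;> simp [hrec, hm]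
      · simp only [hrec, Option.bind_some, Option.map_some]
        rw [applyRows_idx]
        rcases hm : mergeRowsA i rows with _ | rows'
        · simp [hm]
        · simp only [hm, Option.bind_some]
          cases applyRows ops rows' <;> simp
  | case2 =>
    rename_i i j ctr rows pr hi hj hne heq ih
    rw [opsB]; simp only [dif_pos hi, dif_pos hj, if_neg hne, if_pos heq]
    simp only [ih]
    rcases hrec : opsB cl pl pol (i+1) j with _ | ops
    · cases hm : mergeRowsA i rows <;> simp [hrec, hm]
    · simp only [hrec, Option.bind_some, Option.map_some]
      rw [applyRows_idx]
      rcases hm : mergeRowsA i rows with _ | rows'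
      · simp [hm]
      · simp only [hm, Option.bind_some]
        cases applyRows ops rows' <;> simp
  | case3 =>
    rename_i i j ctr rows pr hi hj hne hne2 heq ih
    rw [opsB]; simp only [dif_pos hi, dif_pos hj, if_neg hne, if_neg hne2, if_pos heq]
    rcases hpo : pol[j]? with _ | pch
    · simp [hpo]
    · simp only [hpo, Option.bind_some, ih]
      rcases hrec : opsB cl pl pol i (j+1) with _ | ops
      · simp [hrec]
      · simp only [hrec, Option.bind_some, Option.map_some]
        rw [applyRows_gap]
        cases applyRows ops (gapRowsA rows) <;> simp
  | case4 =>
    rename_i i j ctr rows pr hi hj hne hne2 hne3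
    rw [opsB]; simp only [dif_pos hi, dif_pos hj, if_neg hne, if_neg hne2, if_neg hne3]
    rfl
  | case5 =>
    rename_i i j ctr rows pr hi hj heq ih
    rw [opsB]; simp only [dif_pos hi, dif_neg hj, if_pos heq]
    simp only [ih]
    rcases hrec : opsB cl pl pol (i+1) j with _ | ops
    · cases hm : mergeRowsA i rows <;> simp [hrec, hm]
    · simp only [hrec, Option.bind_some, Option.map_some]
      rw [applyRows_idx]
      rcases hm : mergeRowsA i rows with _ | rows'
      · simp [hm]
      · simp only [hm, Option.bind_some]
        cases applyRows ops rows' <;> simp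
  | case6 =>
    rename_i i j ctr rows pr hi hj hne ih
    rw [opsB]; simp only [dif_pos hi, dif_neg hj, if_neg hne]
    simp only [ih]
    rcases hrec : opsB cl pl pol (i+1) j with _ | ops
    · cases hm : mergeRowsA i rows <;> simp [hrec, hm]
    · simp only [hrec, Option.bind_some, Option.map_some]
      rw [applyRows_idx]
      rcases hm : mergeRowsA i rows with _ | rows'
      · simp [hm]
      · simp only [hm, Option.bind_some]
        cases applyRows ops rows' <;> simp
  | case7 =>
    rename_i i j ctr rows pr hi hj heq ih
    rw [opsB]; simp only [dif_neg hi, dif_pos hj, if_pos heq]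
    rcases hpo : pol[j]? with _ | pch
    · simp [hpo]
    · simp only [hpo, Option.bind_some, ih]
      rcases hrec : opsB cl pl pol i (j+1) with _ | ops
      · simp [hrec]
      · simp only [hrec, Option.bind_some, Option.map_some]
        rw [applyRows_gap]
        cases applyRows ops (gapRowsA rows) <;> simp
  | case8 =>
    rename_i i j ctr rows pr hi hj hne ih
    rw [opsB]; simp only [dif_neg hi, dif_pos hj, if_neg hne]
    rcases hpo : pol[j]? with _ | pch
    · simp [hpo]
    · simp only [hpo, Option.bind_some, ih]
      rcases hrec : opsB cl pl pol i (j+1) with _ | ops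
      · simp [hrec]
      · simp only [hrec, Option.bind_some, Option.map_some]
        rw [applyRows_gap]
        cases applyRows ops (gapRowsA rows) <;> simp
  | case9 =>
    rename_i i j ctr rows pr hi hj
    rw [opsB]; simp only [dif_neg hi, dif_neg hj]
    simp [applyRows_nil]

lemma rowChars2_eq (s : List Char) (ops : List (Char × Option Nat × Char)) :
    rowChars2 s (ops.map (fun z => z.2.1)) = rowCharsB s ops := by
  induction ops with
  | nil => rfl
  | cons op ops ih => simp [rowChars2, rowCharsB, rowChar2, rowChar, ih]

lemma rowsB2_eq (items : List (String × String)) (ops : List (Char × Option Nat × Char)) :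
    rowsB2 (ops.map (fun z => z.2.1)) items
      = (applyRows ops (items.map (fun kv => ((kv.1, kv.2.toList), ([] : List Char))))).map
          (List.map (fun r => (r.1.1, String.ofList r.2))) := by
  induction items with
  | nil => rfl
  | cons kv rest ih =>
    simp only [rowsB2, applyRows, List.map_cons, ih, rowChars2_eq]
    rcases hops : rowCharsB kv.2.toList ops with _ | cs
    · simp [hops]
    · rcases har : applyRows ops (rest.map (fun kv => ((kv.1, kv.2.toList), ([] : List Char))))
        with _ | rs <;> simp [hops, har]

-- project an op list to its three column streams
def projOps (o : Option (List (Char × Option Nat × Char))) :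
    Option (List Char × List (Option Nat) × List Char) :=
  o.map (fun ops => (ops.map (·.1), ops.map (fun z => z.2.1), ops.map (fun z => z.2.2)))

def wfSegs : List (Nat × Option Char) → Prop
  | [] => True
  | (_, some x) :: r => x ≠ '-' ∧ wfSegs r
  | (_, none) :: r => ∀ p ∈ r, p = (0, none)

def flatSegs (segs : List (Nat × Option Char)) : List Char :=
  segs.flatMap (fun g => List.replicate g.1 '-' ++ g.2.toList)

lemma projOps_cons (op : Char × Option Nat × Char) (o : Option (List (Char × Option Nat × Char))) :
    projOps (o.map (op :: ·))
      = (projOps o).map (fun r => (op.1 :: r.1, op.2.1 :: r.2.1, op.2.2 :: r.2.2)) := by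
  cases o <;> simp [projOps]

lemma mapM_map_succ {α : Type} (l : List Nat) (f : Nat → Option α) :
    (l.map (· + 1)).mapM f = l.mapM (fun t => f (t + 1)) := by
  induction l with
  | nil => rfl
  | cons a l ih => simp [List.mapM_cons, ih]

lemma segPairB_zero_g (pol : List Char) (b j : Nat) : segPairB pol b j 0 = some [] := by
  simp [segPairB]

lemma segPairB_succ (pol : List Char) (b j g : Nat) :
    segPairB pol b j (g+1)
      = (if 0 < b then pol[j]? else some '-').bind
          (fun c => (segPairB pol (b-1) (j+1) g).map (c :: ·)) := by
  unfold segPairB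
  rw [List.range_succ_eq_map, List.mapM_cons, mapM_map_succ]
  have he : (fun t => if t + 1 < b then pol[j+(t+1)]? else some '-')
      = (fun t => if t < b - 1 then pol[(j+1)+t]? else some '-') := by
    funext t
    rcases b with _ | b'
    · simp
    · rw [Nat.add_sub_cancel]
      by_cases h : t < b'
      · rw [if_pos (by omega), if_pos h]
        congr 1; omega
      · rw [if_neg (by omega), if_neg h]
  rw [he]
  rcases b with _ | b'
  · rw [if_neg (by omega : ¬ (0:Nat) < 0)]
    cases h : (List.range g).mapM (fun t => if t < 0 - 1 then pol[(j+1)+t]? else some '-') <;>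
      simp [h] <;> rfl
  · rw [if_pos (by omega : 0 < b' + 1), show ((j:Nat) + 0 = j) from rfl]
    cases hp : pol[j]? <;>
      cases h : (List.range g).mapM (fun t => if t < b' + 1 - 1 then pol[(j+1)+t]? else some '-') <;>
      simp [hp, h] <;> rfl

lemma segPairB_zero_b (pol : List Char) (j g : Nat) :
    segPairB pol 0 j g = some (List.replicate g '-') := by
  induction g generalizing j with
  | zero => rfl
  | succ g ih => rw [segPairB_succ]; simp [ih, List.replicate_succ]

lemma gapColsB_zero_g (a i : Nat) : gapColsB a i 0 = [] := by simp [gapColsB]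

lemma gapColsB_succ (a i g : Nat) :
    gapColsB a i (g+1) = (if 0 < a then some i else none) :: gapColsB (a-1) (i+1) g := by
  unfold gapColsB
  rw [List.range_succ_eq_map, List.map_cons, List.map_map]
  refine congrArg₂ List.cons ?_ ?_
  · rcases a with _ | a' <;> simp
  · apply List.map_congr_left
    intro t _
    show (if t + 1 < a then some (i + (t+1)) else none) = _
    rcases a with _ | a'
    · simp
    · rw [Nat.add_sub_cancel]
      by_cases h : t < a'
      · rw [if_pos (by omega), if_pos h]
        congr 1; omega
      · rw [if_neg (by omega), if_neg h]

lemma gapColsB_zero_a (i g : Nat) : gapColsB 0 i g = List.replicate g none := by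
  induction g generalizing i with
  | zero => rfl
  | succ g ih => rw [gapColsB_succ]; simp [ih, List.replicate_succ]

lemma flatSegs_append (l1 l2 : List (Nat × Option Char)) :
    flatSegs (l1 ++ l2) = flatSegs l1 ++ flatSegs l2 := by
  simp [flatSegs]

lemma flatSegs_cons (p : Nat × Option Char) (r : List (Nat × Option Char)) :
    flatSegs (p :: r) = List.replicate p.1 '-' ++ p.2.toList ++ flatSegs r := by
  simp [flatSegs]

lemma segLoop_flat (s : List Char) : ∀ (acc : List (Nat × Option Char)) (gap : Nat),
    flatSegs (segLoopB acc gap s) = flatSegs acc ++ List.replicate gap '-' ++ s := by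
  induction s with
  | nil => intro acc gap; simp [segLoopB, flatSegs_append, flatSegs]
  | cons c rest ih =>
    intro acc gap
    by_cases h : c = '-'
    · rw [segLoopB, if_pos h, ih]
      subst h
      simp [List.replicate_succ' ]
    · rw [segLoopB, if_neg h, ih, flatSegs_append]
      simp [flatSegs]

lemma segLoop_shape (s : List Char) : ∀ (acc : List (Nat × Option Char)) (gap : Nat),
    ∃ body g', segLoopB acc gap s = acc ++ body ++ [(g', none)] ∧
      ∀ p ∈ body, ∃ c, p.2 = some c ∧ c ≠ '-' := by
  induction s with
  | nil => intro acc gap; exact ⟨[], gap, by simp [segLoopB], by simp⟩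
  | cons c rest ih =>
    intro acc gap
    by_cases h : c = '-'
    · rw [segLoopB, if_pos h]; exact ih acc (gap+1)
    · rw [segLoopB, if_neg h]
      obtain ⟨body, g', heq, hb⟩ := ih (acc ++ [(gap, some c)]) 0
      refine ⟨(gap, some c) :: body, g', by simpa using heq, ?_⟩
      intro p hp
      rcases List.mem_cons.mp hp with hp | hp
      · exact ⟨c, by simp [hp], by simp [hp, h]⟩
      · exact hb p hp

lemma wf_pad (body : List (Nat × Option Char)) (g' k : Nat)
    (hb : ∀ p ∈ body, ∃ c, p.2 = some c ∧ c ≠ '-') :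
    wfSegs (body ++ (g', none) :: List.replicate k ((0 : Nat), (none : Option Char))) := by
  induction body with
  | nil =>
    simp only [List.nil_append]
    show ∀ p ∈ List.replicate k ((0:Nat), (none : Option Char)), p = (0, none)
    intro p hp; exact List.eq_of_mem_replicate hp
  | cons q body ih =>
    obtain ⟨c, hc, hne⟩ := hb q (by simp)
    obtain ⟨qa, qo⟩ := q
    simp only at hc
    subst hc
    exact ⟨hne, ih (fun p hp => hb p (by simp [hp]))⟩

lemma flat_pad (k : Nat) :
    flatSegs (List.replicate k ((0 : Nat), (none : Option Char))) = [] := by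
  induction k with
  | zero => rfl
  | succ k ih => simpa [List.replicate_succ, flatSegs] using ih

lemma gaps_of_drop (s : List Char) (i a : Nat) (rest : List Char)
    (h : s.drop i = List.replicate a '-' ++ rest) : ∀ t, t < a → s[i+t]? = some '-' := by
  intro t ht
  rw [← List.getElem?_drop, h, List.getElem?_append_left (by simpa using ht)]
  simp [ht]

lemma char_of_drop (s : List Char) (i a : Nat) (c : Char) (rest : List Char)
    (h : s.drop i = List.replicate a '-' ++ c :: rest) : s[i+a]? = some c := by
  rw [← List.getElem?_drop, h, List.getElem?_append_right (by simp)]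
  simp

lemma len_of_drop (s : List Char) (i a : Nat)
    (h : s.drop i = List.replicate a '-') : s.length ≤ i + a := by
  have := congrArg List.length h
  simp at this
  omega

lemma drop_of_drop_char (s : List Char) (i a : Nat) (c : Char) (rest : List Char)
    (h : s.drop i = List.replicate a '-' ++ c :: rest) : s.drop (i+a+1) = rest := by
  have h1 : s.drop (i+a+1) = (s.drop i).drop (a+1) := by
    rw [List.drop_drop]; try congr 1; try omega
  rw [h1, h, show List.replicate a '-' ++ c :: rest = (List.replicate a '-' ++ [c]) ++ rest by simp,
    List.drop_left' (by simp)]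

lemma drop_of_drop_gap (s : List Char) (i a : Nat) (rest : List Char)
    (h : s.drop i = List.replicate a '-' ++ rest) : s.drop (i+a) = rest := by
  have h1 : s.drop (i+a) = (s.drop i).drop a := by
    rw [List.drop_drop]; try congr 1; try omega
  rw [h1, h, List.drop_left' (by simp)]

lemma flat_of_pad (r : List (Nat × Option Char)) (h : ∀ p ∈ r, p = (0, none)) :
    flatSegs r = [] := by
  induction r with
  | nil => rfl
  | cons p r' ih =>
    have hp := h p (by simp)
    subst hp
    simp only [flatSegs_cons]
    simp [ih (fun q hq => h q (by simp [hq]))]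

lemma wf_of_pad (r : List (Nat × Option Char)) (h : ∀ p ∈ r, p = (0, none)) :
    wfSegs r := by
  cases r with
  | nil => trivial
  | cons p r' =>
    have hp := h p (by simp)
    subst hp
    exact fun q hq => h q (by simp [hq])

theorem opsB_seg_aux (cl pl pol : List Char) (n : Nat) :
    ∀ (a b : Nat), a + b = n → ∀ (x y : Option Char) (i j : Nat),
    (∀ t, t < a → cl[i+t]? = some '-') →
    (∀ t, t < b → pl[j+t]? = some '-') →
    (∀ cx, x = some cx → cl[i+a]? = some cx ∧ cx ≠ '-') →
    (x = none → cl.length ≤ i + a) →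
    (∀ cy, y = some cy → pl[j+b]? = some cy ∧ cy ≠ '-') →
    (y = none → pl.length ≤ j + b) →
    projOps (opsB cl pl pol i j)
      = (segPairB pol b j (max a b)).bind (fun gp =>
          match x, y with
          | some cx, some cy =>
            if cx ≠ cy then none
            else (pol[j+b]?).bind (fun pch =>
              (projOps (opsB cl pl pol (i+a+1) (j+b+1))).map (fun r =>
                (List.replicate (max a b) '-' ++ cx :: r.1,
                 gapColsB a i (max a b) ++ some (i+a) :: r.2.1,
                 gp ++ pch :: r.2.2)))
          | none, some cy =>
            (pol[j+b]?).bind (fun pch =>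
              (projOps (opsB cl pl pol (i+a) (j+b+1))).map (fun r =>
                (List.replicate (max a b) '-' ++ cy :: r.1,
                 gapColsB a i (max a b) ++ none :: r.2.1,
                 gp ++ pch :: r.2.2)))
          | some cx, none =>
            (projOps (opsB cl pl pol (i+a+1) (j+b))).map (fun r =>
              (List.replicate (max a b) '-' ++ cx :: r.1,
               gapColsB a i (max a b) ++ some (i+a) :: r.2.1,
               gp ++ '-' :: r.2.2))
          | none, none =>
            (projOps (opsB cl pl pol (i+a) (j+b))).map (fun r =>
              (List.replicate (max a b) '-' ++ r.1,
               gapColsB a i (max a b) ++ r.2.1,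
               gp ++ r.2.2))) := by
  induction n using Nat.strong_induction_on with
  | _ n IHn =>
  intro a b hn x y i j hca hpb hcx hcn hpy hpn
  subst hn

  rcases a with _ | a' <;> rcases b with _ | b'
  · -- a = 0, b = 0
    simp only [Nat.add_zero, Nat.max_self, segPairB_zero_g, gapColsB_zero_g,
      Option.bind_some, List.nil_append, List.replicate]
    rcases x with _ | cx <;> rcases y with _ | cy
    · -- none, none
      have hi : ¬ i < cl.length := by have := hcn rfl; omega
      have hj : ¬ j < pl.length := by have := hpn rfl; omega
      have hv : opsB cl pl pol i j = some [] := by rw [opsB]; simp [hi, hj]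
      simp [hv, projOps]
    · -- x none, y some cy
      obtain ⟨hpj, hcyne⟩ := hpy cy rfl
      rw [Nat.add_zero] at hpj
      obtain ⟨hj, hpje⟩ := List.getElem?_eq_some_iff.mp hpj
      have hi : ¬ i < cl.length := by have := hcn rfl; omega
      rw [opsB, dif_neg hi, dif_pos hj, ite_self]
      simp only [hpje]
      cases hp : pol[j]? with
      | none => simp [projOps]
      | some pch =>
        simp only [Option.bind_some]
        rw [projOps_cons]
    · -- x some cx, y none
      obtain ⟨hci, hcxne⟩ := hcx cx rfl
      rw [Nat.add_zero] at hci
      obtain ⟨hi, hcie⟩ := List.getElem?_eq_some_iff.mp hci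
      have hj : ¬ j < pl.length := by have := hpn rfl; omega
      rw [opsB, dif_pos hi, dif_neg hj, ite_self]
      simp only [hcie]
      rw [projOps_cons]
    · -- both some
      obtain ⟨hci, hcxne⟩ := hcx cx rfl
      rw [Nat.add_zero] at hci
      obtain ⟨hi, hcie⟩ := List.getElem?_eq_some_iff.mp hci
      obtain ⟨hpj, hcyne⟩ := hpy cy rfl
      rw [Nat.add_zero] at hpj
      obtain ⟨hj, hpje⟩ := List.getElem?_eq_some_iff.mp hpj
      rw [opsB, dif_pos hi, dif_pos hj]
      by_cases hxy : cx = cy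
      · subst hxy
        rw [if_pos (by rw [hcie, hpje])]
        simp only [hcie, ne_eq, not_true_eq_false, Bool.false_eq_true, if_false]
        cases hp : pol[j]? with
        | none => simp [projOps]
        | some pch =>
          simp only [Option.bind_some]
          rw [projOps_cons]
      · rw [if_neg (by rw [hcie, hpje]; exact hxy), if_neg (by rw [hcie]; exact hcxne),
          if_neg (by rw [hpje]; exact hcyne)]
        simp [projOps, hxy]
  · -- a = 0, b = b'+1
    have hpj := hpb 0 (by omega)
    rw [Nat.add_zero] at hpj
    obtain ⟨hj, hpje⟩ := List.getElem?_eq_some_iff.mp hpj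
    have hmax : max 0 (b'+1) = (max 0 b') + 1 := by omega
    have e2 : j + (b'+1) = j + 1 + b' := by omega
    rw [hmax, segPairB_succ, if_pos (by omega : 0 < b'+1), Nat.add_sub_cancel,
      gapColsB_zero_a, e2, List.replicate_succ]
    have IH := IHn b' (by omega) 0 b' (by omega) x y i (j+1)
      (by intro t ht; exact absurd ht (by omega))
      (by intro t ht; have := hpb (t+1) (by omega); rw [show j + (t+1) = j + 1 + t by omega] at this; exact this)
      (by intro cx hx; have := hcx cx hx; rwa [Nat.add_zero] at this ⊢)
      (by intro hx; have := hcn hx; omega)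
      (by intro cy hy; have := hpy cy hy; rwa [show j + (b'+1) = j + 1 + b' by omega] at this)
      (by intro hy; have := hpn hy; omega)
    rw [gapColsB_zero_a] at IH
    simp only [Nat.add_zero] at IH ⊢
    have step : projOps (opsB cl pl pol i j)
        = (pol[j]?).bind (fun pch =>
            (projOps (opsB cl pl pol i (j+1))).map
              (fun r => ('-' :: r.1, none :: r.2.1, pch :: r.2.2))) := by
      rcases x with _ | cx
      · have hi : ¬ i < cl.length := by have := hcn rfl; omega
        rw [opsB, dif_neg hi, dif_pos hj, ite_self]
        simp only [hpje]
        cases hp : pol[j]? with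
        | none => simp [projOps]
        | some pch =>
          simp only [Option.bind_some]
          rw [projOps_cons]
      · obtain ⟨hci, hcxne⟩ := hcx cx rfl
        rw [Nat.add_zero] at hci
        obtain ⟨hi, hcie⟩ := List.getElem?_eq_some_iff.mp hci
        rw [opsB, dif_pos hi, dif_pos hj]
        rw [if_neg (by rw [hcie, hpje]; exact hcxne), if_neg (by rw [hcie]; exact hcxne),
          if_pos hpje]
        simp only [hpje]
        cases hp : pol[j]? with
        | none => simp [projOps]
        | some pch =>
          simp only [Option.bind_some]
          rw [projOps_cons]
    rw [step, IH]
    cases hp : pol[j]? with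
    | none => simp
    | some pch =>
      simp only [Option.bind_some]
      cases hsp : segPairB pol b' (j+1) (max 0 b') with
      | none => simp
      | some gp =>
        simp only [Option.bind_some, Option.map_some]
        rcases x with _ | cx <;> rcases y with _ | cy
        · cases ho : projOps (opsB cl pl pol i (j+1+b')) <;> simp [ho, List.replicate_succ]
        · cases hq : pol[j+1+b']? <;> simp only [hq, Option.bind_none, Option.bind_some]
          · simp
          · cases ho : projOps (opsB cl pl pol i (j+1+b'+1)) <;> simp [ho, List.replicate_succ]
        · cases ho : projOps (opsB cl pl pol (i+1) (j+1+b')) <;> simp [ho, List.replicate_succ]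
        · by_cases hxy : cx = cy
          · subst hxy
            simp only [ne_eq, not_true_eq_false, Bool.false_eq_true, if_false]
            cases hq : pol[j+1+b']? <;> simp only [hq, Option.bind_none, Option.bind_some]
            · simp
            · cases ho : projOps (opsB cl pl pol (i+1) (j+1+b'+1)) <;> simp [ho, List.replicate_succ]
          · simp [hxy]
  · -- a = a'+1, b = 0
    have hci := hca 0 (by omega)
    rw [Nat.add_zero] at hci
    obtain ⟨hi, hcie⟩ := List.getElem?_eq_some_iff.mp hci
    have hmax : max (a'+1) 0 = (max a' 0) + 1 := by omega
    have e1 : i + (a'+1) = i + 1 + a' := by omega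
    rw [hmax, segPairB_zero_b, gapColsB_succ, if_pos (by omega : 0 < a'+1),
      Nat.add_sub_cancel, e1, List.replicate_succ, Option.bind_some]
    have IH := IHn a' (by omega) a' 0 (by omega) x y (i+1) j
      (by intro t ht; have := hca (t+1) (by omega); rw [show i + (t+1) = i + 1 + t by omega] at this; exact this)
      (by intro t ht; exact absurd ht (by omega))
      (by intro cx hx; have := hcx cx hx; rwa [show i + (a'+1) = i + 1 + a' by omega] at this)
      (by intro hx; have := hcn hx; omega)
      (by intro cy hy; have := hpy cy hy; rwa [Nat.add_zero] at this ⊢)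
      (by intro hy; have := hpn hy; omega)
    rw [segPairB_zero_b, Option.bind_some, Nat.max_zero] at IH
    simp only [Nat.add_zero] at IH ⊢
    have step : projOps (opsB cl pl pol i j)
        = (projOps (opsB cl pl pol (i+1) j)).map
            (fun r => ('-' :: r.1, some i :: r.2.1, '-' :: r.2.2)) := by
      rcases y with _ | cy
      · have hj : ¬ j < pl.length := by have := hpn rfl; omega
        rw [opsB, dif_pos hi, dif_neg hj, ite_self]
        simp only [hcie]
        rw [projOps_cons]
      · obtain ⟨hpj, hcyne⟩ := hpy cy rfl
        rw [Nat.add_zero] at hpj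
        obtain ⟨hj, hpje⟩ := List.getElem?_eq_some_iff.mp hpj
        rw [opsB, dif_pos hi, dif_pos hj]
        rw [if_neg (by rw [hcie, hpje]; exact fun h => hcyne h.symm), if_pos hcie]
        simp only [hcie]
        rw [projOps_cons]
    rw [step, IH]
    rcases x with _ | cx <;> rcases y with _ | cy
    · cases ho : projOps (opsB cl pl pol (i+1+a') j) <;> simp [ho, List.replicate_succ]
    · cases hq : pol[j]? <;> simp only [hq, Option.bind_none, Option.bind_some]
      · simp
      · cases ho : projOps (opsB cl pl pol (i+1+a') (j+1)) <;> simp [ho, List.replicate_succ]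
    · cases ho : projOps (opsB cl pl pol (i+1+a'+1) j) <;> simp [ho, List.replicate_succ]
    · by_cases hxy : cx = cy
      · subst hxy
        simp only [ne_eq, not_true_eq_false, Bool.false_eq_true, if_false]
        cases hq : pol[j]? <;> simp only [hq, Option.bind_none, Option.bind_some]
        · simp
        · cases ho : projOps (opsB cl pl pol (i+1+a'+1) (j+1)) <;> simp [ho, List.replicate_succ]
      · simp [hxy]
  · -- a = a'+1, b = b'+1
    have hci := hca 0 (by omega)
    rw [Nat.add_zero] at hci
    obtain ⟨hi, hcie⟩ := List.getElem?_eq_some_iff.mp hci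
    have hpj := hpb 0 (by omega)
    rw [Nat.add_zero] at hpj
    obtain ⟨hj, hpje⟩ := List.getElem?_eq_some_iff.mp hpj
    have hmax : max (a'+1) (b'+1) = (max a' b') + 1 := by omega
    have e1 : i + (a'+1) = i + 1 + a' := by omega
    have e2 : j + (b'+1) = j + 1 + b' := by omega
    rw [hmax, segPairB_succ, if_pos (by omega : 0 < b'+1), gapColsB_succ,
      if_pos (by omega : 0 < a'+1), Nat.add_sub_cancel, Nat.add_sub_cancel,
      e1, e2, List.replicate_succ]
    have IH := IHn (a'+b') (by omega) a' b' rfl x y (i+1) (j+1)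
      (by intro t ht; have := hca (t+1) (by omega); rw [show i + (t+1) = i + 1 + t by omega] at this; exact this)
      (by intro t ht; have := hpb (t+1) (by omega); rw [show j + (t+1) = j + 1 + t by omega] at this; exact this)
      (by intro cx hx; have := hcx cx hx; rwa [show i + (a'+1) = i + 1 + a' by omega] at this)
      (by intro hx; have := hcn hx; omega)
      (by intro cy hy; have := hpy cy hy; rwa [show j + (b'+1) = j + 1 + b' by omega] at this)
      (by intro hy; have := hpn hy; omega)
    have step : projOps (opsB cl pl pol i j)
        = (pol[j]?).bind (fun pch =>
            (projOps (opsB cl pl pol (i+1) (j+1))).map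
              (fun r => ('-' :: r.1, some i :: r.2.1, pch :: r.2.2))) := by
      rw [opsB, dif_pos hi, dif_pos hj, if_pos (by rw [hcie, hpje])]
      simp only [hcie]
      cases hp : pol[j]? with
      | none => simp [projOps]
      | some pch =>
        simp only [Option.bind_some]
        rw [projOps_cons]
    rw [step, IH]
    cases hp : pol[j]? with
    | none => simp
    | some pch =>
      simp only [Option.bind_some]
      cases hsp : segPairB pol b' (j+1) (max a' b') with
      | none => simp
      | some gp =>
        simp only [Option.bind_some, Option.map_some]
        rcases x with _ | cx <;> rcases y with _ | cy
        · cases ho : projOps (opsB cl pl pol (i+1+a') (j+1+b')) <;> simp [ho, List.replicate_succ]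
        · cases hq : pol[j+1+b']? <;> simp only [hq, Option.bind_none, Option.bind_some]
          · simp
          · cases ho : projOps (opsB cl pl pol (i+1+a') (j+1+b'+1)) <;> simp [ho, List.replicate_succ]
        · cases ho : projOps (opsB cl pl pol (i+1+a'+1) (j+1+b')) <;> simp [ho, List.replicate_succ]
        · by_cases hxy : cx = cy
          · subst hxy
            simp only [ne_eq, not_true_eq_false, Bool.false_eq_true, if_false]
            cases hq : pol[j+1+b']? <;> simp only [hq, Option.bind_none, Option.bind_some]
            · simp
            · cases ho : projOps (opsB cl pl pol (i+1+a'+1) (j+1+b'+1)) <;> simp [ho, List.replicate_succ]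
          · simp [hxy]

theorem opsB_seg (cl pl pol : List Char) (a b : Nat) (x y : Option Char) (i j : Nat)
    (hca : ∀ t, t < a → cl[i+t]? = some '-')
    (hpb : ∀ t, t < b → pl[j+t]? = some '-')
    (hcx : ∀ cx, x = some cx → cl[i+a]? = some cx ∧ cx ≠ '-')
    (hcn : x = none → cl.length ≤ i + a)
    (hpy : ∀ cy, y = some cy → pl[j+b]? = some cy ∧ cy ≠ '-')
    (hpn : y = none → pl.length ≤ j + b) :
    projOps (opsB cl pl pol i j)
      = (segPairB pol b j (max a b)).bind (fun gp =>
          match x, y with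
          | some cx, some cy =>
            if cx ≠ cy then none
            else (pol[j+b]?).bind (fun pch =>
              (projOps (opsB cl pl pol (i+a+1) (j+b+1))).map (fun r =>
                (List.replicate (max a b) '-' ++ cx :: r.1,
                 gapColsB a i (max a b) ++ some (i+a) :: r.2.1,
                 gp ++ pch :: r.2.2)))
          | none, some cy =>
            (pol[j+b]?).bind (fun pch =>
              (projOps (opsB cl pl pol (i+a) (j+b+1))).map (fun r =>
                (List.replicate (max a b) '-' ++ cy :: r.1,
                 gapColsB a i (max a b) ++ none :: r.2.1,
                 gp ++ pch :: r.2.2)))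
          | some cx, none =>
            (projOps (opsB cl pl pol (i+a+1) (j+b))).map (fun r =>
              (List.replicate (max a b) '-' ++ cx :: r.1,
               gapColsB a i (max a b) ++ some (i+a) :: r.2.1,
               gp ++ '-' :: r.2.2))
          | none, none =>
            (projOps (opsB cl pl pol (i+a) (j+b))).map (fun r =>
              (List.replicate (max a b) '-' ++ r.1,
               gapColsB a i (max a b) ++ r.2.1,
               gp ++ r.2.2))) :=
  opsB_seg_aux cl pl pol (a+b) a b rfl x y i j hca hpb hcx hcn hpy hpn

lemma bMerge_eq (cl pl pol : List Char) (zs : List ((Nat × Option Char) × (Nat × Option Char))) :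
    ∀ (i j : Nat) (cp : List (List Char)) (cs : List (Option Nat)) (pp : List (List Char)),
    cl.drop i = flatSegs (zs.map Prod.fst) → wfSegs (zs.map Prod.fst) →
    pl.drop j = flatSegs (zs.map Prod.snd) → wfSegs (zs.map Prod.snd) →
    (bMerge pol zs i j cp cs pp).map (fun r => (r.1.flatten, r.2.1, r.2.2.flatten))
      = (projOps (opsB cl pl pol i j)).map (fun r =>
          (cp.flatten ++ r.1, cs ++ r.2.1, pp.flatten ++ r.2.2)) := by
  induction zs with
  | nil =>
    intro i j cp cs pp h1 h2 h3 h4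
    have hi : cl.length ≤ i := by
      have := congrArg List.length h1; simp [flatSegs] at this; omega
    have hj : pl.length ≤ j := by
      have := congrArg List.length h3; simp [flatSegs] at this; omega
    have hv : opsB cl pl pol i j = some [] := by
      rw [opsB]; simp [show ¬ i < cl.length by omega, show ¬ j < pl.length by omega]
    simp [bMerge, hv, projOps]
  | cons z rest ih =>
    obtain ⟨⟨a, x⟩, b, y⟩ := z
    intro i j cp cs pp h1 h2 h3 h4
    simp only [List.map_cons, flatSegs_cons] at h1 h3
    -- hypotheses of the segment-step lemma
    have hca : ∀ t, t < a → cl[i+t]? = some '-' :=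
      gaps_of_drop cl i a _ (by rw [h1, List.append_assoc])
    have hpb : ∀ t, t < b → pl[j+t]? = some '-' :=
      gaps_of_drop pl j b _ (by rw [h3, List.append_assoc])
    have hcx : ∀ cx, x = some cx → cl[i+a]? = some cx ∧ cx ≠ '-' := by
      intro cx hx; subst hx
      exact ⟨char_of_drop cl i a cx _ (by simpa using h1), h2.1⟩
    have hcn : x = none → cl.length ≤ i + a := by
      intro hx; subst hx
      simp only [Option.toList_none, List.append_nil] at h1
      rw [flat_of_pad _ h2] at h1
      simp only [List.append_nil] at h1
      exact len_of_drop cl i a h1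
    have hpy : ∀ cy, y = some cy → pl[j+b]? = some cy ∧ cy ≠ '-' := by
      intro cy hy; subst hy
      exact ⟨char_of_drop pl j b cy _ (by simpa using h3), h4.1⟩
    have hpn : y = none → pl.length ≤ j + b := by
      intro hy; subst hy
      simp only [Option.toList_none, List.append_nil] at h3
      rw [flat_of_pad _ h4] at h3
      simp only [List.append_nil] at h3
      exact len_of_drop pl j b h3
    rw [bMerge, opsB_seg cl pl pol a b x y i j hca hpb hcx hcn hpy hpn]
    cases hsp : segPairB pol b j (max a b) with
    | none => simp
    | some gp =>
      simp only [Option.bind_some]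
      rcases x with _ | cx <;> rcases y with _ | cy
      · -- none, none
        have h1' : cl.drop (i+a) = flatSegs (rest.map Prod.fst) := by
          rw [flat_of_pad _ h2] at h1 ⊢
          simp only [Option.toList_none, List.append_nil] at h1
          exact drop_of_drop_gap cl i a _ (by simpa using h1)
        have h3' : pl.drop (j+b) = flatSegs (rest.map Prod.snd) := by
          rw [flat_of_pad _ h4] at h3 ⊢
          simp only [Option.toList_none, List.append_nil] at h3
          exact drop_of_drop_gap pl j b _ (by simpa using h3)
        have h2' : wfSegs (rest.map Prod.fst) := wf_of_pad _ h2
        have h4' : wfSegs (rest.map Prod.snd) := wf_of_pad _ h4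
        rw [ih (i+a) (j+b) _ _ _ h1' h2' h3' h4']
        cases ho : projOps (opsB cl pl pol (i+a) (j+b)) <;> simp [ho]
      · -- x none, y some cy
        have h1' : cl.drop (i+a) = flatSegs (rest.map Prod.fst) := by
          rw [flat_of_pad _ h2] at h1 ⊢
          simp only [Option.toList_none, List.append_nil] at h1
          exact drop_of_drop_gap cl i a _ (by simpa using h1)
        have h3' : pl.drop (j+b+1) = flatSegs (rest.map Prod.snd) :=
          drop_of_drop_char pl j b cy _ (by simpa using h3)
        have h2' : wfSegs (rest.map Prod.fst) := wf_of_pad _ h2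
        have h4' : wfSegs (rest.map Prod.snd) := h4.2
        cases hq : pol[j+b]? with
        | none => simp
        | some pch =>
          simp only [Option.bind_some]
          rw [ih (i+a) (j+b+1) _ _ _ h1' h2' h3' h4']
          cases ho : projOps (opsB cl pl pol (i+a) (j+b+1)) <;> simp [ho]
      · -- x some cx, y none
        have h1' : cl.drop (i+a+1) = flatSegs (rest.map Prod.fst) :=
          drop_of_drop_char cl i a cx _ (by simpa using h1)
        have h3' : pl.drop (j+b) = flatSegs (rest.map Prod.snd) := by
          rw [flat_of_pad _ h4] at h3 ⊢
          simp only [Option.toList_none, List.append_nil] at h3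
          exact drop_of_drop_gap pl j b _ (by simpa using h3)
        have h2' : wfSegs (rest.map Prod.fst) := h2.2
        have h4' : wfSegs (rest.map Prod.snd) := wf_of_pad _ h4
        rw [ih (i+a+1) (j+b) _ _ _ h1' h2' h3' h4']
        cases ho : projOps (opsB cl pl pol (i+a+1) (j+b)) <;> simp [ho]
      · -- both some
        have h1' : cl.drop (i+a+1) = flatSegs (rest.map Prod.fst) :=
          drop_of_drop_char cl i a cx _ (by simpa using h1)
        have h3' : pl.drop (j+b+1) = flatSegs (rest.map Prod.snd) :=
          drop_of_drop_char pl j b cy _ (by simpa using h3)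
        have h2' : wfSegs (rest.map Prod.fst) := h2.2
        have h4' : wfSegs (rest.map Prod.snd) := h4.2
        by_cases hxy : cx = cy
        · subst hxy
          simp only [ne_eq, not_true_eq_false, Bool.false_eq_true, if_false]
          cases hq : pol[j+b]? with
          | none => simp
          | some pch =>
            simp only [Option.bind_some]
            rw [ih (i+a+1) (j+b+1) _ _ _ h1' h2' h3' h4']
            cases ho : projOps (opsB cl pl pol (i+a+1) (j+b+1)) <;> simp [ho]
        · simp [hxy]

lemma segments_flat (s : List Char) (k : Nat) :
    flatSegs (segmentsB s ++ List.replicate k ((0 : Nat), (none : Option Char))) = s := by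
  rw [flatSegs_append, flat_pad, List.append_nil, segmentsB, segLoop_flat]
  simp [flatSegs]

lemma segments_wf (s : List Char) (k : Nat) :
    wfSegs (segmentsB s ++ List.replicate k ((0 : Nat), (none : Option Char))) := by
  obtain ⟨body, g', heq, hb⟩ := segLoop_shape s [] 0
  rw [segmentsB, heq]
  simpa [List.append_assoc] using wf_pad body g' k hb

-- ===== VERDICT (by name: the statement is the Claim_ definition above) =====
theorem merge_alignment_py_spec : Claim_equal_merge_alignment_py := by
  intro cc ea pc po pid _ _
  unfold Spec_merge_alignment_py
  have hla : (segmentsB cc.toList ++ List.replicate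
      (max (segmentsB cc.toList).length (segmentsB pc.toList).length - (segmentsB cc.toList).length)
      ((0 : Nat), (none : Option Char))).length
      = max (segmentsB cc.toList).length (segmentsB pc.toList).length := by
    first
    | (simp; omega)
    | simp
  have hlb : (segmentsB pc.toList ++ List.replicate
      (max (segmentsB cc.toList).length (segmentsB pc.toList).length - (segmentsB pc.toList).length)
      ((0 : Nat), (none : Option Char))).length
      = max (segmentsB cc.toList).length (segmentsB pc.toList).length := by
    first
    | (simp; omega)
    | simp
  have hfst : ((segmentsB cc.toList ++ List.replicate
      (max (segmentsB cc.toList).length (segmentsB pc.toList).length - (segmentsB cc.toList).length)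
      ((0 : Nat), (none : Option Char))).zip (segmentsB pc.toList ++ List.replicate
      (max (segmentsB cc.toList).length (segmentsB pc.toList).length - (segmentsB pc.toList).length)
      ((0 : Nat), (none : Option Char)))).map Prod.fst = (segmentsB cc.toList ++ List.replicate
      (max (segmentsB cc.toList).length (segmentsB pc.toList).length - (segmentsB cc.toList).length)
      ((0 : Nat), (none : Option Char))) :=
    List.map_fst_zip (by rw [hla, hlb])
  have hsnd : ((segmentsB cc.toList ++ List.replicate
      (max (segmentsB cc.toList).length (segmentsB pc.toList).length - (segmentsB cc.toList).length)
      ((0 : Nat), (none : Option Char))).zip (segmentsB pc.toList ++ List.replicate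
      (max (segmentsB cc.toList).length (segmentsB pc.toList).length - (segmentsB pc.toList).length)
      ((0 : Nat), (none : Option Char)))).map Prod.snd = (segmentsB pc.toList ++ List.replicate
      (max (segmentsB cc.toList).length (segmentsB pc.toList).length - (segmentsB pc.toList).length)
      ((0 : Nat), (none : Option Char))) :=
    List.map_snd_zip (by rw [hla, hlb])
  have hm := bMerge_eq cc.toList pc.toList po.toList
    ((segmentsB cc.toList ++ List.replicate
      (max (segmentsB cc.toList).length (segmentsB pc.toList).length - (segmentsB cc.toList).length)
      ((0 : Nat), (none : Option Char))).zip
     (segmentsB pc.toList ++ List.replicate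
      (max (segmentsB cc.toList).length (segmentsB pc.toList).length - (segmentsB pc.toList).length)
      ((0 : Nat), (none : Option Char)))) 0 0 [] [] []
    (by rw [hfst, List.drop_zero]; exact (segments_flat cc.toList _).symm)
    (by rw [hfst]; exact segments_wf cc.toList _)
    (by rw [hsnd, List.drop_zero]; exact (segments_flat pc.toList _).symm)
    (by rw [hsnd]; exact segments_wf pc.toList _)
  simp only [merge_alignment_py, merge_alignment_py_alt]
  rw [loopA_eq]
  cases hops : opsB cc.toList pc.toList po.toList 0 0 with
  | none =>
    rw [hops] at hm
    simp only [hops, Option.bind_none]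
    have hbm : bMerge po.toList
        ((segmentsB cc.toList ++ List.replicate
          (max (segmentsB cc.toList).length (segmentsB pc.toList).length - (segmentsB cc.toList).length)
          ((0 : Nat), (none : Option Char))).zip
         (segmentsB pc.toList ++ List.replicate
          (max (segmentsB cc.toList).length (segmentsB pc.toList).length - (segmentsB pc.toList).length)
          ((0 : Nat), (none : Option Char)))) 0 0 [] [] [] = none := by
      rcases hb : bMerge po.toList
        ((segmentsB cc.toList ++ List.replicate
          (max (segmentsB cc.toList).length (segmentsB pc.toList).length - (segmentsB cc.toList).length)
          ((0 : Nat), (none : Option Char))).zip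
         (segmentsB pc.toList ++ List.replicate
          (max (segmentsB cc.toList).length (segmentsB pc.toList).length - (segmentsB pc.toList).length)
          ((0 : Nat), (none : Option Char)))) 0 0 [] [] [] with _ | r
      · rfl
      · rw [hb] at hm; simp [projOps] at hm
    rw [hbm]
  | some ops =>
    rw [hops] at hm
    simp only [projOps, Option.map_some, List.flatten_nil, List.nil_append] at hm
    obtain ⟨⟨cp, cols, pp⟩, hbm, hf⟩ := Option.map_eq_some_iff.mp hm
    simp only [Prod.mk.injEq] at hf
    obtain ⟨hf1, hf2, hf3⟩ := hf
    rw [hbm]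
    simp only [hops, Option.bind_some]
    rw [hf2, rowsB2_eq]
    cases har : applyRows ops ((PySem.Dict.ofList ea).items.map
        (fun kv => ((kv.1, kv.2.toList), ([] : List Char)))) with
    | none => simp
    | some rowsF =>
      simp only [Option.map_some]
      simp [hf1, hf3]
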